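-- pv_equiv track=rewrite | github.com/ShunTR-KD/supporting_diet | utils.py | build_hierarchical_category_id
-- ===== SOURCE A (Python) =====
-- def build_hierarchical_category_id(category_id: str, categories_data: dict) -> str:
--     """
--     カテゴリIDから階層形式のIDを構築する
--
--     Args:
--         category_id: 単体カテゴリID
--         categories_data: カテゴリ一覧データ
--
--     Returns:
--         階層形式のカテゴリID（例: "30-300" または "30-300-1132"）
--     """
--     if not categories_data or 'result' not in categories_data:
--         return category_id
--
--     result = categories_data['result']
--
--     # 各レベルでカテゴリIDを検索
--     for level_name in ['large', 'medium', 'small']: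
--         if level_name in result:
--             categories = result[level_name]
--
--             for category in categories:
--                 if str(category.get('categoryId', '')) == str(category_id):
--                     parent_id = category.get('parentCategoryId', '')
--
--                     if level_name == 'large':
--                         # 大カテゴリの場合はそのまま
--                         return category_id
--                     elif level_name == 'medium':
--                         # 中カテゴリの場合: 大-中
--                         if parent_id:
--                             return f"{parent_id}-{category_id}"
--                         return category_id
--                     elif level_name == 'small':
--                         # 小カテゴリの場合: 大-中-小
--                         if parent_id:
--                             # 親（中カテゴリ）の階層IDを構築
--                             parent_hierarchical = build_hierarchical_category_id(parent_id, categories_data)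
--                             return f"{parent_hierarchical}-{category_id}"
--                         return category_id
--
--     # 見つからない場合は元のIDをそのまま返す
--     return category_id
-- ===== SOURCE B (Python) =====
-- def build_hierarchical_category_id(category_id: str, categories_data: dict) -> str:
--     """Index-based re-implementation: one dict mapping categoryId -> (level, parent),
--     then an iterative walk up the parent chain instead of rescanning the levels."""
--     if not categories_data or 'result' not in categories_data:
--         return category_id
--     result = categories_data['result']
--
--     index = {}
--     for level in ('large', 'medium', 'small'):
--         if level in result:
--             for cat in result[level]:
--                 index.setdefault(str(cat.get('categoryId', '')),
--                                  (level, str(cat.get('parentCategoryId', ''))))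
--
--     out = category_id
--     cur = str(category_id)
--     while True:
--         info = index.get(cur)
--         if info is None:
--             return out
--         level, parent = info
--         if level == 'small' and parent:
--             out = f"{parent}-{out}"
--             cur = parent
--         elif level == 'medium' and parent:
--             return f"{parent}-{out}"
--         else:
--             return out
-- ===== Notes on version B (the rewrite author's own statement) =====
-- stated objective: alternative
-- what changed: Replaces A's recursion that rescans all three level lists on every (possibly recursive) call with a single first-insert-wins dict index categoryId -> (level, parentCategoryId) built once, followed by an iterative walk up the parent chain that accumulates the hierarchical id front-to-back.
import Mathlib
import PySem

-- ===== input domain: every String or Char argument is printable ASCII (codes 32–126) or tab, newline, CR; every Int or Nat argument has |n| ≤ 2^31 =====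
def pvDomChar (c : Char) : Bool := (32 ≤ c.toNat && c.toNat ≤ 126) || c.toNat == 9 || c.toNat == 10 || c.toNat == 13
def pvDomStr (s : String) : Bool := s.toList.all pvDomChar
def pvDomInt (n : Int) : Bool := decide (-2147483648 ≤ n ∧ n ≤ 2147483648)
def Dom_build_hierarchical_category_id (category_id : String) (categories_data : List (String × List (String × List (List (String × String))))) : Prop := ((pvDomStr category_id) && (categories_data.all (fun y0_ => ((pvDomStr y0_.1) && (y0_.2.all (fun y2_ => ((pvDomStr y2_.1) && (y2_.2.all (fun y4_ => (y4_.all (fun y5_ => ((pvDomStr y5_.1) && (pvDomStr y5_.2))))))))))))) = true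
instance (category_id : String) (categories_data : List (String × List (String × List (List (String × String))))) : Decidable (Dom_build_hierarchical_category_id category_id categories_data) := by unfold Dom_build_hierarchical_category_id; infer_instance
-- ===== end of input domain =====

-- B replaces A's recursive per-level rescans with a single categoryId -> (level, parent) index
-- and an iterative walk up the parent chain (objective: alternative, same asymptotic cost here).


-- shared accessors: str(cat.get('categoryId', '')) and str(cat.get('parentCategoryId', ''))
def pvCatId (cat : List (String × String)) : String :=
  PySem.Dict.getD (PySem.Dict.mk cat) "categoryId" ""
def pvParentId (cat : List (String × String)) : String :=
  PySem.Dict.getD (PySem.Dict.mk cat) "parentCategoryId" ""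

-- the small-level category list (used for the fuel bound and by Pre_)
def pvSmallCats (categories_data : List (String × List (String × List (List (String × String))))) :
    List (List (String × String)) :=
  (PySem.Dict.get? (PySem.Dict.mk ((PySem.Dict.get? (PySem.Dict.mk categories_data) "result").getD []))
    "small").getD []

-- fuel bound: inside Pre_ the parent chain makes at most |small|+1 steps, so |small|+2 is exact
def pvFuel (categories_data : List (String × List (String × List (List (String × String))))) : Nat :=
  (pvSmallCats categories_data).length + 2

-- ===== PORT A =====
-- the two nested for-loops with early return: first matching category in level order
def pvScanLevels (category_id : String)
    (result : PySem.Dict String (List (List (String × String)))) :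
    List String → Option (String × String)
  | [] => none
  | level :: rest =>
    match PySem.Dict.get? result level with
    | none => pvScanLevels category_id result rest
    | some categories =>
      match categories.find? (fun cat => pvCatId cat == category_id) with
      | none => pvScanLevels category_id result rest
      | some cat => some (level, pvParentId cat)

-- fuel only makes A's recursion total in Lean; inside Pre_ (acyclic chain) pvFuel is enough
def pvBuildA : Nat → String → List (String × List (String × List (List (String × String)))) → String
  | 0, category_id, _ => category_id
  | fuel + 1, category_id, categories_data =>
    if categories_data.isEmpty || !(PySem.Dict.mk categories_data).contains "result" then category_id
    else
      let result := PySem.Dict.mk ((PySem.Dict.get? (PySem.Dict.mk categories_data) "result").getD [])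
      match pvScanLevels category_id result ["large", "medium", "small"] with
      | none => category_id
      | some (level, parent_id) =>
        if level = "large" then category_id
        else if level = "medium" then
          if parent_id ≠ "" then parent_id ++ "-" ++ category_id else category_id
        else
          if parent_id ≠ "" then pvBuildA fuel parent_id categories_data ++ "-" ++ category_id
          else category_id

def build_hierarchical_category_id (category_id : String) (categories_data : List (String × List (String × List (List (String × String))))) : String :=
  pvBuildA (pvFuel categories_data) category_id categories_data

-- ===== PORT B =====
-- index.setdefault(...) over one level's category list
def pvIndexCats (level : String) (cats : List (List (String × String)))
    (idx : PySem.Dict String (String × String)) : PySem.Dict String (String × String) :=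
  cats.foldl (fun idx cat => PySem.Dict.setdefault idx (pvCatId cat) (level, pvParentId cat)) idx

def pvIndexLevel (result : PySem.Dict String (List (List (String × String))))
    (idx : PySem.Dict String (String × String)) (level : String) :
    PySem.Dict String (String × String) :=
  match PySem.Dict.get? result level with
  | none => idx
  | some cats => pvIndexCats level cats idx

-- the while loop; fuel only makes it total in Lean (≤ pvFuel iterations inside Pre_)
def pvResolve (index : PySem.Dict String (String × String)) :
    Nat → String → String → String
  | 0, _, out => out
  | fuel + 1, cur, out =>
    match PySem.Dict.get? index cur with
    | none => out
    | some (level, parent) =>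
      if level = "small" ∧ parent ≠ "" then pvResolve index fuel parent (parent ++ "-" ++ out)
      else if level = "medium" ∧ parent ≠ "" then parent ++ "-" ++ out
      else out

def build_hierarchical_category_id_alt (category_id : String) (categories_data : List (String × List (String × List (List (String × String))))) : String :=
  if categories_data.isEmpty || !(PySem.Dict.mk categories_data).contains "result" then category_id
  else
    let result := PySem.Dict.mk ((PySem.Dict.get? (PySem.Dict.mk categories_data) "result").getD [])
    let index := ["large", "medium", "small"].foldl (pvIndexLevel result) PySem.Dict.empty
    pvResolve index (pvFuel categories_data) category_id category_id

-- ===== PRECONDITION & SPEC =====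
-- Pre_'s own chain-step (independent of the ports): the id's first match in level order,
-- continuing only from a small-level category with a truthy parent
def pvPreFind (level : String) (res : PySem.Dict String (List (List (String × String))))
    (id : String) : Option (List (String × String)) :=
  ((PySem.Dict.get? res level).getD []).find?
    (fun cat => PySem.Dict.getD (PySem.Dict.mk cat) "categoryId" "" == id)

def pvPreStep (res : PySem.Dict String (List (List (String × String)))) (id : String) :
    Option String :=
  if (pvPreFind "large" res id).isSome || (pvPreFind "medium" res id).isSome then none
  else
    match pvPreFind "small" res id with
    | none => none
    | some cat =>
      let p := PySem.Dict.getD (PySem.Dict.mk cat) "parentCategoryId" ""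
      if p = "" then none else some p

def pvChainOk (res : PySem.Dict String (List (List (String × String)))) :
    Nat → String → Bool
  | 0, id => (pvPreStep res id).isNone
  | fuel + 1, id =>
    match pvPreStep res id with
    | none => true
    | some p => pvChainOk res fuel p

-- Pre_ excludes exactly the inputs whose small-level parent chain starting from category_id is
-- cyclic: there Python A recurses forever and raises RecursionError (it returns no value).
-- An acyclic chain visits pairwise distinct small categories, so it terminates within
-- |small|+1 steps; a chain that does not is cyclic.
def Pre_build_hierarchical_category_id (category_id : String) (categories_data : List (String × List (String × List (List (String × String))))) : Prop :=
  pvChainOk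
    (PySem.Dict.mk ((PySem.Dict.get? (PySem.Dict.mk categories_data) "result").getD []))
    ((pvSmallCats categories_data).length + 1) category_id = true
instance (category_id : String) (categories_data : List (String × List (String × List (List (String × String))))) : Decidable (Pre_build_hierarchical_category_id category_id categories_data) := by unfold Pre_build_hierarchical_category_id; infer_instance

def pvWitness_build_hierarchical_category_id : String × (List (String × List (String × List (List (String × String))))) :=
  ("1132", [("result", [("large", [[("categoryId", "30")]]),
                        ("medium", [[("categoryId", "300"), ("parentCategoryId", "30")]]),
                        ("small", [[("categoryId", "1132"), ("parentCategoryId", "300")],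
                                   [("categoryId", "1133"), ("parentCategoryId", "1132")]])])])

def Spec_build_hierarchical_category_id (category_id : String) (categories_data : List (String × List (String × List (List (String × String))))) (out : String) : Prop := out = build_hierarchical_category_id_alt category_id categories_data
instance (category_id : String) (categories_data : List (String × List (String × List (List (String × String))))) (out : String) : Decidable (Spec_build_hierarchical_category_id category_id categories_data out) := by unfold Spec_build_hierarchical_category_id; infer_instance

-- ===== CLAIM (what is proved, stated in full; the proofs are below) =====
def Claim_equal_build_hierarchical_category_id : Prop := ∀ (category_id : String) (categories_data : List (String × List (String × List (List (String × String))))), Dom_build_hierarchical_category_id category_id categories_data → Pre_build_hierarchical_category_id category_id categories_data → Spec_build_hierarchical_category_id category_id categories_data (build_hierarchical_category_id category_id categories_data)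

-- ===== LEMMAS AND PROOFS =====

-- first match of `k` at one level, tagged with the level
def pvG (result : PySem.Dict String (List (List (String × String)))) (level k : String) :
    Option (String × String) :=
  (((PySem.Dict.get? result level).getD []).find? (fun cat => pvCatId cat == k)).map
    (fun cat => (level, pvParentId cat))

theorem pvScanLevels_cons (k : String) (result : PySem.Dict String (List (List (String × String))))
    (level : String) (rest : List String) :
    pvScanLevels k result (level :: rest) =
      (pvG result level k).or (pvScanLevels k result rest) := by
  cases h : PySem.Dict.get? result level with
  | none => simp [pvScanLevels, pvG, h]
  | some cats =>
    cases hf : cats.find? (fun cat => pvCatId cat == k) <;> simp [pvScanLevels, pvG, h, hf]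

theorem get?_pvIndexCats (level : String) (cats : List (List (String × String)))
    (idx : PySem.Dict String (String × String)) (k : String) :
    (pvIndexCats level cats idx).get? k =
      (idx.get? k).or ((cats.find? (fun cat => pvCatId cat == k)).map
        (fun cat => (level, pvParentId cat))) := by
  induction cats generalizing idx with
  | nil => simp [pvIndexCats]
  | cons c cs ih =>
    have hstep : pvIndexCats level (c :: cs) idx =
        pvIndexCats level cs (PySem.Dict.setdefault idx (pvCatId c) (level, pvParentId c)) := rfl
    rw [hstep, ih]
    by_cases hk : pvCatId c = k
    · subst hk
      rw [PySem.Dict.get?_setdefault_self]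
      cases idx.get? (pvCatId c) <;> simp
    · rw [PySem.Dict.get?_setdefault_of_ne idx _ (Ne.symm hk)]
      simp [hk]

theorem get?_pvIndexLevel (result : PySem.Dict String (List (List (String × String))))
    (idx : PySem.Dict String (String × String)) (level k : String) :
    (pvIndexLevel result idx level).get? k = (idx.get? k).or (pvG result level k) := by
  unfold pvIndexLevel pvG
  cases h : PySem.Dict.get? result level with
  | none => simp
  | some cats => simp [get?_pvIndexCats]

theorem get?_index_eq_scan (result : PySem.Dict String (List (List (String × String)))) (k : String) :
    ((["large", "medium", "small"].foldl (pvIndexLevel result) PySem.Dict.empty).get? k) =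
      pvScanLevels k result ["large", "medium", "small"] := by
  rw [pvScanLevels_cons, pvScanLevels_cons, pvScanLevels_cons]
  simp [List.foldl, get?_pvIndexLevel, pvScanLevels, PySem.Dict.get?_empty, Option.or_assoc]

theorem pvG_fst (result : PySem.Dict String (List (List (String × String)))) (level k : String)
    (q : String × String) (h : pvG result level k = some q) : q.1 = level := by
  unfold pvG at h
  cases hf : ((PySem.Dict.get? result level).getD []).find? (fun cat => pvCatId cat == k) with
  | none => rw [hf] at h; simp at h
  | some cat =>
    rw [hf] at h
    simp only [Option.map_some, Option.some.injEq] at h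
    rw [← h]

-- the core: B's iterative walk with accumulator equals A's recursion, for EVERY fuel
theorem pvResolve_eq_pvBuildA
    (data : List (String × List (String × List (List (String × String)))))
    (res : List (String × List (List (String × String))))
    (hg : (data.isEmpty || !(PySem.Dict.mk data).contains "result") = false)
    (hres : PySem.Dict.get? (PySem.Dict.mk data) "result" = some res) :
    ∀ (fuel : Nat) (cur s : String),
      pvResolve (["large", "medium", "small"].foldl (pvIndexLevel (PySem.Dict.mk res))
          PySem.Dict.empty) fuel cur (cur ++ s)
        = pvBuildA fuel cur data ++ s := by
  intro fuel
  induction fuel with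
  | zero => intro cur s; rfl
  | succ fuel ih =>
    intro cur s
    have hgn : ¬ ((data.isEmpty || !(PySem.Dict.mk data).contains "result") = true) := by
      rw [hg]; exact Bool.false_ne_true
    unfold pvResolve pvBuildA
    rw [if_neg hgn, hres]
    simp only [Option.getD_some]
    rw [get?_index_eq_scan]
    cases hscan : pvScanLevels cur (PySem.Dict.mk res) ["large", "medium", "small"] with
    | none => rfl
    | some q =>
      obtain ⟨level, p⟩ := q
      -- the scan only returns levels from the scanned list
      have hlv : level = "large" ∨ level = "medium" ∨ level = "small" := by
        rw [pvScanLevels_cons, pvScanLevels_cons, pvScanLevels_cons] at hscan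
        cases hL : pvG (PySem.Dict.mk res) "large" cur with
        | some q' =>
          rw [hL] at hscan
          simp only [Option.some_or, Option.some.injEq] at hscan
          exact Or.inl (by have := pvG_fst _ _ _ _ hL; rw [hscan] at this; simpa using this)
        | none =>
          rw [hL] at hscan
          simp only [Option.none_or] at hscan
          cases hM : pvG (PySem.Dict.mk res) "medium" cur with
          | some q' =>
            rw [hM] at hscan
            simp only [Option.some_or, Option.some.injEq] at hscan
            exact Or.inr (Or.inl (by have := pvG_fst _ _ _ _ hM; rw [hscan] at this; simpa using this))
          | none =>
            rw [hM] at hscan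
            simp only [Option.none_or] at hscan
            cases hS : pvG (PySem.Dict.mk res) "small" cur with
            | some q' =>
              rw [hS] at hscan
              simp only [pvScanLevels, Option.or_none, Option.some.injEq] at hscan
              exact Or.inr (Or.inr (by have := pvG_fst _ _ _ _ hS; rw [hscan] at this; simpa using this))
            | none =>
              rw [hS] at hscan; simp [pvScanLevels] at hscan
      rcases hlv with h | h | h
      · subst h; simp
      · subst h
        by_cases hp : p = "" <;> simp [hp, String.append_assoc]
      · subst h
        by_cases hp : p = ""
        · simp [hp]
        · have hrec := ih p ("-" ++ (cur ++ s))
          simp only [List.foldl_cons, List.foldl_nil] at hrec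
          simp [hp, String.append_assoc]
          exact hrec

-- ===== VERDICT (by name: the statement is the Claim_ definition above) =====
theorem build_hierarchical_category_id_spec : Claim_equal_build_hierarchical_category_id := by
  intro cid data _ _
  unfold Spec_build_hierarchical_category_id
  unfold build_hierarchical_category_id build_hierarchical_category_id_alt
  by_cases hg : (data.isEmpty || !(PySem.Dict.mk data).contains "result") = true
  · rw [if_pos hg]
    cases hF : pvFuel data with
    | zero => rfl
    | succ f => unfold pvBuildA; rw [if_pos hg]
  · rw [if_neg hg]
    cases hres : PySem.Dict.get? (PySem.Dict.mk data) "result" with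
    | none =>
      exfalso
      apply hg
      rw [PySem.Dict.contains_eq_isSome_get?, hres]
      simp
    | some res =>
      have hg' : (data.isEmpty || !(PySem.Dict.mk data).contains "result") = false := by
        simpa using hg
      have h := pvResolve_eq_pvBuildA data res hg' hres (pvFuel data) cid ""
      simp only [String.append_empty] at h
      simpa [hres] using h.symm
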